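-- pv_equiv track=rewrite | github.com/Maytide/AnimeStride | FetchMALData/User.py | replace_comma_between_quote
-- ===== SOURCE A (Python) =====
-- def replace_comma_between_quote(entry):
--     str_index = 0
--     commaless_entry_str = ''
--     in_string = False
--     while str_index < len(entry):
--         current_char = entry[str_index]
--         if entry[str_index] == ',' and in_string == True:
--             #Special value for comma character
--             current_char = '[Comma]'
--         if entry[str_index] == '"' and in_string == False:
--             in_string = True
--         elif entry[str_index] == '"' and in_string == True:
--             in_string = False
--         commaless_entry_str += current_char
--         str_index += 1
--     return commaless_entry_str
-- ===== SOURCE B (Python) =====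
-- def replace_comma_between_quote(entry):
--     parts = entry.split('"')
--     return '"'.join(p.replace(',', '[Comma]') if i % 2 == 1 else p
--                     for i, p in enumerate(parts))
-- ===== Notes on version B (the rewrite author's own statement) =====
-- stated objective: faster
-- what changed: Replaces the per-character while-loop with an explicit in_string flag by splitting on the double-quote character (odd-indexed segments are exactly the quoted regions), applying str.replace to the odd segments, and rejoining.
import Mathlib
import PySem

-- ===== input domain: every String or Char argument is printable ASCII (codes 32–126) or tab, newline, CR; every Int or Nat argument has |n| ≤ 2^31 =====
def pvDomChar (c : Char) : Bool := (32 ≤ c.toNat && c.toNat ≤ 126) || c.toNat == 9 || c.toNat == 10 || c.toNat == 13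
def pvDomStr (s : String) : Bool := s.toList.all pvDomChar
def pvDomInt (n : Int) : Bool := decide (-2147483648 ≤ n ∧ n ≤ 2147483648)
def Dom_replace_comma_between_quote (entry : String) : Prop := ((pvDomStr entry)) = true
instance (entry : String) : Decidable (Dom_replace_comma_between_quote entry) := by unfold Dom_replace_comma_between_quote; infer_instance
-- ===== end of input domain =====

-- B splits on the double-quote character and fixes commas only in the odd (quoted) segments instead of A's per-character flag loop; measurably faster in Python via C-level split/replace/join.

-- ===== PORT A =====
-- A's while loop: state (in_string, accumulated string), one character per step.
def pvALoop : List Char → Bool → List Char → List Char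
  | [], _, acc => acc
  | c :: rest, ins, acc =>
      let cur := if c = ',' ∧ ins = true then "[Comma]".toList else [c]
      let ins' := if c = '"' ∧ ins = false then true
                  else if c = '"' ∧ ins = true then false
                  else ins
      pvALoop rest ins' (acc ++ cur)

def replace_comma_between_quote (entry : String) : String :=
  String.mk (pvALoop entry.toList false [])

-- ===== PORT B =====
def replace_comma_between_quote_alt (entry : String) : String :=
  String.mk (PySem.Chars.join ['"']
    ((PySem.List.enumerate (PySem.Chars.splitOn entry.toList ['"'])).map (fun p =>
      if PySem.Int.mod p.1 2 = 1 then PySem.Chars.replace p.2 [','] "[Comma]".toList else p.2)))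

-- ===== PRECONDITION & SPEC =====
def Spec_replace_comma_between_quote (entry : String) (out : String) : Prop := out = replace_comma_between_quote_alt entry
instance (entry : String) (out : String) : Decidable (Spec_replace_comma_between_quote entry out) := by unfold Spec_replace_comma_between_quote; infer_instance

-- ===== CLAIM (what is proved, stated in full; the proofs are below) =====
def Claim_equal_replace_comma_between_quote : Prop := ∀ (entry : String), Dom_replace_comma_between_quote entry → Spec_replace_comma_between_quote entry (replace_comma_between_quote entry)

-- ===== LEMMAS AND PROOFS =====

-- structural characterisation of entry.split('"') : (first segment, remaining segments)
def pvSplit : List Char → List Char × List (List Char)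
  | [] => ([], [])
  | c :: cs =>
      let r := pvSplit cs
      if c = '"' then ([], r.1 :: r.2) else (c :: r.1, r.2)

-- structural characterisation of seg.replace(',', '[Comma]')
def pvRep : List Char → List Char
  | [] => []
  | c :: cs => (if c = ',' then ['[', 'C', 'o', 'm', 'm', 'a', ']'] else [c]) ++ pvRep cs

-- alternating map: fix segments at odd positions (true = current position is odd)
def pvAlt : Bool → List (List Char) → List (List Char)
  | _, [] => []
  | false, x :: xs => x :: pvAlt true xs
  | true,  x :: xs => pvRep x :: pvAlt false xs

lemma pvSplit_go (l : List Char) : ∀ (fuel : Nat), l.length ≤ fuel → ∀ (cur : List Char) (acc : List (List Char)),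
    PySem.Chars.splitOn.go ['"'] fuel l cur acc
      = acc.reverse ++ (cur.reverse ++ (pvSplit l).1) :: (pvSplit l).2 := by
  induction l with
  | nil =>
      intro fuel _ cur acc
      cases fuel <;> simp [PySem.Chars.splitOn.go, pvSplit]
  | cons c rest ih =>
      intro fuel hf cur acc
      cases fuel with
      | zero => simp at hf
      | succ f =>
          have hrest : rest.length ≤ f := by simpa using hf
          by_cases hc : c = '"'
          · subst hc
            simp only [PySem.Chars.splitOn.go, List.isPrefixOf, BEq.rfl, Bool.and_eq_true]
            rw [if_pos (by simp),
              show List.drop ['"'].length ('"' :: rest) = rest from rfl,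
              ih f hrest [] (List.reverse cur :: acc)]
            simp [pvSplit]
          · simp only [PySem.Chars.splitOn.go]
            rw [if_neg (by simp [List.isPrefixOf] ; exact fun h => hc h.symm)]
            rw [ih f hrest (c :: cur) acc]
            simp [pvSplit, hc]

lemma pvSplit_eq (cs : List Char) :
    PySem.Chars.splitOn cs ['"'] = (pvSplit cs).1 :: (pvSplit cs).2 := by
  have := pvSplit_go cs (cs.length + 1) (by omega) [] []
  simpa [PySem.Chars.splitOn] using this

lemma pvRep_go (l : List Char) : ∀ (fuel : Nat), l.length ≤ fuel → ∀ (acc : List Char),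
    PySem.Chars.replace.go [','] ['[', 'C', 'o', 'm', 'm', 'a', ']'] fuel l acc = acc.reverse ++ pvRep l := by
  induction l with
  | nil =>
      intro fuel _ acc
      cases fuel <;> simp [PySem.Chars.replace.go, pvRep]
  | cons c rest ih =>
      intro fuel hf acc
      cases fuel with
      | zero => simp at hf
      | succ f =>
          have hrest : rest.length ≤ f := by simpa using hf
          by_cases hc : c = ','
          · subst hc
            simp only [PySem.Chars.replace.go]
            rw [if_pos (by simp [List.isPrefixOf]),
              show List.drop [','].length (',' :: rest) = rest from rfl, ih f hrest]
            simp [pvRep]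
          · simp only [PySem.Chars.replace.go]
            rw [if_neg (by simp [List.isPrefixOf] ; exact fun h => hc h.symm)]
            rw [ih f hrest (c :: acc)]
            simp [pvRep, hc]

lemma pvRep_eq (cs : List Char) :
    PySem.Chars.replace cs [','] ['[', 'C', 'o', 'm', 'm', 'a', ']'] = pvRep cs := by
  have := pvRep_go cs cs.length (le_refl _) []
  simpa [PySem.Chars.replace] using this

-- the enumerate/parity comprehension is the alternating map
lemma pvEnum_alt (parts : List (List Char)) : ∀ (s : Int), 0 ≤ s →
    (PySem.List.enumerate parts s).map (fun p =>
        if PySem.Int.mod p.1 2 = 1 then PySem.Chars.replace p.2 [','] "[Comma]".toList else p.2)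
      = pvAlt (decide (s % 2 = 1)) parts := by
  induction parts with
  | nil => intro s _; simp [PySem.List.enumerate, pvAlt]
  | cons x xs ih =>
      intro s hs
      rw [PySem.List.enumerate_cons, List.map_cons, ih (s + 1) (by omega)]
      have hmod : PySem.Int.mod s 2 = s % 2 := PySem.Int.mod_eq_emod_of_pos (by omega)
      by_cases h : s % 2 = 1
      · rw [show (decide (s % 2 = 1)) = true by simp [h],
          show (decide ((s + 1) % 2 = 1)) = false by simp ; omega]
        simp only [pvAlt, hmod, if_pos h, List.cons.injEq]
        exact ⟨pvRep_eq x, trivial⟩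
      · rw [show (decide (s % 2 = 1)) = false by simp [h],
          show (decide ((s + 1) % 2 = 1)) = true by simp ; omega]
        simp [pvAlt, h]

lemma pvJoin_append_head (sep a x : List Char) (xs : List (List Char)) :
    PySem.Chars.join sep ((a ++ x) :: xs) = a ++ PySem.Chars.join sep (x :: xs) := by
  cases xs with
  | nil => simp [PySem.Chars.join_singleton]
  | cons y ys => simp [PySem.Chars.join_cons_cons, List.append_assoc]

-- main invariant: A's loop equals join of the alternately-fixed split segments
lemma pvMain (cs : List Char) : ∀ (ins : Bool) (acc : List Char),
    pvALoop cs ins acc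
      = acc ++ PySem.Chars.join ['"'] (pvAlt ins ((pvSplit cs).1 :: (pvSplit cs).2)) := by
  induction cs with
  | nil =>
      intro ins acc
      cases ins <;> simp [pvALoop, pvSplit, pvAlt, pvRep, PySem.Chars.join_singleton]
  | cons c rest ih =>
      intro ins acc
      by_cases hc : c = '"'
      · subst hc
        cases ins <;>
          simp [pvALoop, pvSplit, pvAlt, pvRep, ih, PySem.Chars.join_cons_cons,
            List.append_assoc]
      · have hsplit : pvSplit (c :: rest) = (c :: (pvSplit rest).1, (pvSplit rest).2) := by
          simp [pvSplit, hc]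
        cases ins with
        | false =>
            simp only [pvALoop]
            rw [if_neg (fun h => hc h.1), if_neg (fun h => hc h.1),
              if_neg (by simp), ih, hsplit]
            rw [show (c :: (pvSplit rest).1) = [c] ++ (pvSplit rest).1 from rfl]
            simp only [pvAlt]
            rw [pvJoin_append_head]
            simp
        | true =>
            simp only [pvALoop]
            rw [if_neg (by simp), if_neg (fun h => hc h.1), ih, hsplit]
            simp only [pvAlt, pvRep]
            rw [pvJoin_append_head]
            by_cases hcm : c = ','
            · rw [if_pos (by simp [hcm]), if_pos hcm]
              simp
            · rw [if_neg (by simp [hcm]), if_neg hcm]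
              simp

-- ===== VERDICT (by name: the statement is the Claim_ definition above) =====
theorem replace_comma_between_quote_spec : Claim_equal_replace_comma_between_quote := by
  intro entry _
  unfold Spec_replace_comma_between_quote replace_comma_between_quote replace_comma_between_quote_alt
  rw [pvSplit_eq, pvEnum_alt _ 0 (by omega), pvMain]
  simp [pvAlt]
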